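-- pv_equiv track=rewrite | github.com/skydraft/python | numericals.py | numericals1
-- ===== SOURCE A (Python) =====
-- def numericals1(s):
--
--     sum1=1
--
--     st='1'
--     s1=s[0]
--     d=dict.fromkeys(s)
--
--     for i in s[1:]:
--         for j in s1:
--             if j==i:
--                 sum1+=1
--         if sum1==1:
--             st +='1'
--         else:
--             st += str(sum1)
--             sum1=1
--         s1+=i
--
--     return st
-- ===== SOURCE B (Python) =====
-- def numericals1(s):
--     counts = {}
--     out = []
--     for ch in s:
--         n = counts.get(ch, 0) + 1
--         counts[ch] = n
--         out.append(str(n))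
--     return ''.join(out)
-- ===== Notes on version B (the rewrite author's own statement) =====
-- stated objective: faster
-- what changed: B makes a single pass keeping an incremental per-character frequency dict instead of rescanning the whole prefix for every character, and joins the pieces at the end.
import Mathlib
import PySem

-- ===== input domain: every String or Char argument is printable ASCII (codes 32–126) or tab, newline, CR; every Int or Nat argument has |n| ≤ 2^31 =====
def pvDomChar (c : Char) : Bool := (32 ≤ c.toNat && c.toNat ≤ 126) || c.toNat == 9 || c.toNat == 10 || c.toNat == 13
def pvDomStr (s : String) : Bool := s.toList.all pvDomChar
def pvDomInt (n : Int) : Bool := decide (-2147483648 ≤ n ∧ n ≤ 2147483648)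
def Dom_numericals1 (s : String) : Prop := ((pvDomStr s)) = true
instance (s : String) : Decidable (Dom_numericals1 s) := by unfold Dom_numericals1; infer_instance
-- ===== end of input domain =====

-- B replaces A's quadratic rescan of the prefix for each character by a single pass with an
-- incremental frequency dict (asymptotically faster); equivalence of return values is proved on
-- nonempty strings (A raises IndexError on "").

-- ===== PORT A =====
def numericals1 (s : String) : String :=
  match s.toList with
  | [] => ""   -- unreachable under Pre_: Python's s[0] raises IndexError here
  | c :: rest =>
    let _d := PySem.List.dedup s.toList   -- d = dict.fromkeys(s)  (unused in A)
    let fin := rest.foldl (fun (acc : Int × List Char × List Char) i =>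
      let sum1 := acc.2.2.foldl (fun a j => if j == i then a + 1 else a) acc.1
      if sum1 == 1 then (sum1, acc.2.1 ++ ['1'], acc.2.2 ++ [i])
      else (1, acc.2.1 ++ PySem.Int.toChars sum1, acc.2.2 ++ [i]))
      ((1 : Int), ['1'], [c])
    String.ofList fin.2.1

-- ===== PORT B =====
def numericals1_alt (s : String) : String :=
  let fin := s.toList.foldl (fun (acc : PySem.Dict Char Int × List Char) ch =>
    let n := acc.1.getD ch 0 + 1
    (acc.1.insert ch n, acc.2 ++ PySem.Int.toChars n)) (PySem.Dict.empty, [])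
  String.ofList fin.2

-- ===== PRECONDITION & SPEC =====
-- Pre_ excludes only the empty string, on which A's s[0] raises IndexError.
def Pre_numericals1 (s : String) : Prop := s ≠ ""
instance (s : String) : Decidable (Pre_numericals1 s) := by unfold Pre_numericals1; infer_instance
def pvWitness_numericals1 : String := "aab"

def Spec_numericals1 (s : String) (out : String) : Prop := out = numericals1_alt s
instance (s : String) (out : String) : Decidable (Spec_numericals1 s out) := by unfold Spec_numericals1; infer_instance

-- ===== CLAIM (what is proved, stated in full; the proofs are below) =====
def Claim_equal_numericals1 : Prop := ∀ (s : String), Dom_numericals1 s → Pre_numericals1 s → Spec_numericals1 s (numericals1 s)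

-- ===== LEMMAS AND PROOFS =====

-- canonical result: for each character, str(1 + occurrences in the prefix before it)
def pvCanon : List Char → List Char → List Char
  | _, [] => []
  | pre, c :: t => PySem.Int.toChars (1 + (pre.count c : Int)) ++ pvCanon (pre ++ [c]) t

lemma pvCountFold (l : List Char) (i : Char) (a : Int) :
    l.foldl (fun a j => if j == i then a + 1 else a) a = a + l.count i := by
  induction l generalizing a with
  | nil => simp
  | cons x t ih =>
    rw [List.foldl_cons, ih]
    by_cases h : x = i
    · simp [h]
      ring
    · simp [h]

lemma pvAside (rest : List Char) (pre st : List Char) :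
    (rest.foldl (fun (acc : Int × List Char × List Char) i =>
      let sum1 := acc.2.2.foldl (fun a j => if j == i then a + 1 else a) acc.1
      if sum1 == 1 then (sum1, acc.2.1 ++ ['1'], acc.2.2 ++ [i])
      else (1, acc.2.1 ++ PySem.Int.toChars sum1, acc.2.2 ++ [i]))
      ((1 : Int), st, pre)).2.1 = st ++ pvCanon pre rest := by
  induction rest generalizing pre st with
  | nil => simp [pvCanon]
  | cons i t ih =>
    simp only [List.foldl_cons]
    rw [pvCountFold]
    have hstep : (if ((1 : Int) + (pre.count i : Int)) == 1
          then ((1 : Int) + (pre.count i : Int), st ++ ['1'], pre ++ [i])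
          else ((1 : Int), st ++ PySem.Int.toChars ((1 : Int) + (pre.count i : Int)), pre ++ [i]))
        = ((1 : Int), st ++ PySem.Int.toChars ((1 : Int) + (pre.count i : Int)), pre ++ [i]) := by
      by_cases h : pre.count i = 0
      · have t1 : PySem.Int.toChars (1 : Int) = ['1'] := by decide
        simp [h, t1]
      · rw [if_neg]
        simp only [beq_iff_eq]
        intro hc
        omega
    rw [hstep, ih, pvCanon, List.append_assoc]

lemma pvBside (l : List Char) (d : PySem.Dict Char Int) (out pre : List Char)
    (hd : ∀ c, d.getD c 0 = (pre.count c : Int)) :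
    (l.foldl (fun (acc : PySem.Dict Char Int × List Char) ch =>
      let n := acc.1.getD ch 0 + 1
      (acc.1.insert ch n, acc.2 ++ PySem.Int.toChars n)) (d, out)).2
      = out ++ pvCanon pre l := by
  induction l generalizing d out pre with
  | nil => simp [pvCanon]
  | cons ch t ih =>
    simp only [List.foldl_cons]
    have hinv : ∀ c, (d.insert ch (d.getD ch 0 + 1)).getD c 0
        = ((pre ++ [ch]).count c : Int) := by
      intro c
      rw [PySem.Dict.getD_insert]
      by_cases hc : c = ch
      · subst hc; simp [List.count_append, hd]
      · simp [hc, Ne.symm hc, hd, List.count_append]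
    rw [ih _ _ (pre ++ [ch]) hinv, pvCanon, List.append_assoc, hd,
      add_comm ((pre.count ch : Int)) 1]

-- ===== VERDICT (by name: the statement is the Claim_ definition above) =====
theorem numericals1_spec : Claim_equal_numericals1 := by
  intro s _ hpre
  unfold Spec_numericals1 numericals1 numericals1_alt
  cases hs : s.toList with
  | nil => exact absurd (String.toList_eq_nil_iff.mp hs) hpre
  | cons c rest =>
    simp only [pvAside, pvBside (c :: rest) PySem.Dict.empty [] []
      (by intro x; simp [PySem.Dict.getD_empty])]
    have h0 : pvCanon [] (c :: rest) = ['1'] ++ pvCanon [c] rest := by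
      have t1 : PySem.Int.toChars (1 : Int) = ['1'] := by decide
      simp [pvCanon, t1]
    simp [h0]
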